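-- pv_equiv track=rewrite | github.com/Safa675/bist-quant | app/pages/1_Dashboard.py | _series_to_bands
-- ===== SOURCE A (Python) =====
-- def _series_to_bands(series: dict[str, str]) -> list[dict]:
--     """Convert {date_str: regime_str} dict into contiguous band segments."""
--     if not series:
--         return []
--     dates = sorted(series.keys())
--     bands: list[dict] = []
--     current_regime = series[dates[0]]
--     start = dates[0]
--     for d in dates[1:]:
--         if series[d] != current_regime:
--             bands.append({"start": start, "end": d, "regime": current_regime})
--             current_regime = series[d]
--             start = d
--     bands.append({"start": start, "end": dates[-1], "regime": current_regime})
--     return bands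
-- ===== SOURCE B (Python) =====
-- def _series_to_bands(series):
--     """Convert {date_str: regime_str} dict into contiguous band segments."""
--     runs = []
--     for d, r in sorted(series.items(), key=lambda kv: kv[0]):
--         if runs and runs[-1][0] == r:
--             runs[-1][1].append(d)
--         else:
--             runs.append((r, [d]))
--     bands = [{"start": ds[0], "end": nds[0], "regime": r}
--              for (r, ds), (_nr, nds) in zip(runs, runs[1:])]
--     if runs:
--         r, ds = runs[-1]
--         bands.append({"start": ds[0], "end": ds[-1], "regime": r})
--     return bands
-- ===== Notes on version B (the rewrite author's own statement) =====
-- stated objective: alternative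
-- what changed: Replaces A's single running-state loop (current regime + start carried across iterations, emitting on change) by a two-phase pass: first group the sorted items into contiguous (regime, dates) runs, then build each band by zipping every run with the next one (the last run closing on its own last date).
import Mathlib
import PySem

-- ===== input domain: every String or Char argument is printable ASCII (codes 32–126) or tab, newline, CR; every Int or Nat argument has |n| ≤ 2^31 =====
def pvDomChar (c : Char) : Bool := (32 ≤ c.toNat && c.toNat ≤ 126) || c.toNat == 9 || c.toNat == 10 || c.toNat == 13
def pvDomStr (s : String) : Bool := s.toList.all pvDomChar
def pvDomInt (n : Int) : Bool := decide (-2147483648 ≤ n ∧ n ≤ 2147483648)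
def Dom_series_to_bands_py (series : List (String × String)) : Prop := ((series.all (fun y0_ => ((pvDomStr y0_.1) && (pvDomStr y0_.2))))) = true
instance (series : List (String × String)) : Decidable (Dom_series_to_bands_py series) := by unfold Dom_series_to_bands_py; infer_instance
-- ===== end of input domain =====

-- B replaces A's running-state loop by a two-phase pass (group into runs, then zip runs with their successors); alternative decomposition, same cost.


-- ===== PORT A =====
-- 'series[d]' is ported as Dict.getD with default "": every looked-up key comes from the same dict, so KeyError is impossible.
def series_to_bands_py (series : List (String × String)) : List (List (String × String)) :=
  let dct := PySem.Dict.ofList series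
  -- 'if not series: return []' together with 'dates[0]': dates is empty exactly when the dict is
  let dates := PySem.List.sorted dct.keys (fun k => k) false
  match dates with
  | [] => []
  | d0 :: drest =>
    let step := fun (st : List (List (String × String)) × String × String) (d : String) =>
      if (dct.getD d "") ≠ st.2.1 then
        (st.1 ++ [[("start", st.2.2), ("end", d), ("regime", st.2.1)]], dct.getD d "", d)
      else st
    let fin := drest.foldl step ([], dct.getD d0 "", d0)
    fin.1 ++ [[("start", fin.2.2), ("end", (d0 :: drest).getLast (by simp)), ("regime", fin.2.1)]]

-- ===== PORT B =====
def pvStepR (runs : List (String × List String)) (p : String × String) : List (String × List String) :=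
  match runs.getLast? with
  | some lastRun =>
      if lastRun.1 = p.2 then runs.dropLast ++ [(lastRun.1, lastRun.2 ++ [p.1])]
      else runs ++ [(p.2, [p.1])]
  | none => runs ++ [(p.2, [p.1])]

def series_to_bands_py_alt (series : List (String × String)) : List (List (String × String)) :=
  let dct := PySem.Dict.ofList series
  let runs := (PySem.List.sorted dct.items (fun kv => kv.1) false).foldl pvStepR []
  let bands := (List.zip runs runs.tail).map (fun rn =>
      [("start", rn.1.2.headD ""), ("end", rn.2.2.headD ""), ("regime", rn.1.1)])
  match runs.getLast? with
  | some lastRun =>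
      bands ++ [[("start", lastRun.2.headD ""), ("end", lastRun.2.getLastD ""), ("regime", lastRun.1)]]
  | none => bands

-- ===== PRECONDITION & SPEC =====
def Spec_series_to_bands_py (series : List (String × String)) (out : List (List (String × String))) : Prop := out = series_to_bands_py_alt series
instance (series : List (String × String)) (out : List (List (String × String))) : Decidable (Spec_series_to_bands_py series out) := by unfold Spec_series_to_bands_py; infer_instance

-- ===== CLAIM (what is proved, stated in full; the proofs are below) =====
def Claim_equal_series_to_bands_py : Prop := ∀ (series : List (String × String)), Dom_series_to_bands_py series → Spec_series_to_bands_py series (series_to_bands_py series)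

-- ===== LEMMAS AND PROOFS =====

-- the band shape both programs emit
def pvBand (s e r : String) : List (String × String) :=
  [("start", s), ("end", e), ("regime", r)]

-- common recursive reference: prev = last date consumed so far, start/cur = the open band
def pvF (prev start cur : String) : List (String × String) → List (List (String × String))
  | [] => [pvBand start prev cur]
  | (d, v) :: t => if v = cur then pvF d start cur t else pvBand start d cur :: pvF d d v t

-- small getLast?/headD facts used below
theorem pv_getD_irrel (l : List (String × String)) (h : l ≠ []) (x y : String) :
    ((l.getLast?).map Prod.fst).getD x = ((l.getLast?).map Prod.fst).getD y := by
  obtain ⟨z, hz⟩ := Option.isSome_iff_exists.mp (List.getLast?_isSome.mpr h)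
  simp [hz]

theorem pv_getLastD_map (l : List (String × String)) (d0 : String) :
    (l.map Prod.fst).getLastD d0 = ((l.getLast?).map Prod.fst).getD d0 := by
  induction l generalizing d0 with
  | nil => simp
  | cons x u ih => cases u <;> simp_all

theorem pv_headD_concat (ds : List String) (d : String) (h : ds ≠ []) :
    (ds ++ [d]).headD "" = ds.headD "" := by
  cases ds with
  | nil => exact absurd rfl h
  | cons a u => rfl

-- A's loop step, on dates (with dict lookup) and on (date, value) pairs
def pvStepA (dct : PySem.Dict String String)
    (st : List (List (String × String)) × String × String) (d : String) :
    List (List (String × String)) × String × String :=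
  if (dct.getD d "") ≠ st.2.1 then
    (st.1 ++ [pvBand st.2.2 d st.2.1], dct.getD d "", d)
  else st

def pvStepP (st : List (List (String × String)) × String × String) (p : String × String) :
    List (List (String × String)) × String × String :=
  if p.2 ≠ st.2.1 then (st.1 ++ [pvBand st.2.2 p.1 st.2.1], p.2, p.1) else st

-- B's band-building phase, as a function of the runs list
def pvBandsOf (runs : List (String × List String)) : List (List (String × String)) :=
  let bands := (List.zip runs runs.tail).map (fun rn =>
      [("start", rn.1.2.headD ""), ("end", rn.2.2.headD ""), ("regime", rn.1.1)])
  match runs.getLast? with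
  | some lastRun =>
      bands ++ [[("start", lastRun.2.headD ""), ("end", lastRun.2.getLastD ""), ("regime", lastRun.1)]]
  | none => bands

-- A-side bridge: folding over the dates with lookups = folding over the pairs
theorem pv_foldA_eq_foldP (dct : PySem.Dict String String) :
    ∀ (ts : List (String × String)) (st : List (List (String × String)) × String × String),
    (∀ p ∈ ts, dct.getD p.1 "" = p.2) →
    (ts.map Prod.fst).foldl (pvStepA dct) st = ts.foldl pvStepP st := by
  intro ts
  induction ts with
  | nil => intro st _; rfl
  | cons p t ih =>
      intro st h
      simp only [List.map_cons, List.foldl_cons]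
      rw [show pvStepA dct st p.1 = pvStepP st p by
            simp [pvStepA, pvStepP, h p (by simp)]]
      exact ih _ (fun q hq => h q (by simp [hq]))

-- A's fold + final band = pvF
theorem pv_foldP_eq_pvF :
    ∀ (ps : List (String × String)) (bands : List (List (String × String))) (cur start prev : String),
    (ps.foldl pvStepP (bands, cur, start)).1 ++
        [pvBand (ps.foldl pvStepP (bands, cur, start)).2.2
          (((ps.getLast?).map Prod.fst).getD prev)
          (ps.foldl pvStepP (bands, cur, start)).2.1]
      = bands ++ pvF prev start cur ps := by
  intro ps
  induction ps with
  | nil => intro bands cur start prev; simp [pvF]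
  | cons p t ih =>
      intro bands cur start prev
      obtain ⟨d, v⟩ := p
      by_cases hv : v = cur
      · have h1 : pvStepP (bands, cur, start) (d, v) = (bands, cur, start) := by
          simp [pvStepP, hv]
        have h2 : ((((d, v) :: t).getLast?).map Prod.fst).getD prev
            = ((t.getLast?).map Prod.fst).getD d := by
          cases t with
          | nil => simp
          | cons a u =>
              rw [List.getLast?_cons_cons]
              exact pv_getD_irrel (a :: u) (by simp) prev d
        simp only [List.foldl_cons, h1, h2, pvF, if_pos hv]
        exact ih bands cur start d
      · have h1 : pvStepP (bands, cur, start) (d, v)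
            = (bands ++ [pvBand start d cur], v, d) := by
          simp [pvStepP, hv]
        have h2 : ((((d, v) :: t).getLast?).map Prod.fst).getD prev
            = ((t.getLast?).map Prod.fst).getD d := by
          cases t with
          | nil => simp
          | cons a u =>
              rw [List.getLast?_cons_cons]
              exact pv_getD_irrel (a :: u) (by simp) prev d
        simp only [List.foldl_cons, h1, h2, pvF, if_neg hv]
        rw [ih (bands ++ [pvBand start d cur]) v d d, List.append_assoc]
        rfl

-- B-side: the runs fold only touches the last run, so a prefix passes through
theorem pv_foldR_append :
    ∀ (ps : List (String × String)) (rs l : List (String × List String)), l ≠ [] →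
    ps.foldl pvStepR (rs ++ l) = rs ++ ps.foldl pvStepR l := by
  intro ps
  induction ps with
  | nil => intro rs l _; rfl
  | cons p t ih =>
      intro rs l hl
      simp only [List.foldl_cons]
      obtain ⟨x, hx⟩ := List.getLast?_isSome.mpr hl |> Option.isSome_iff_exists.mp
      have hstep : pvStepR (rs ++ l) p = rs ++ pvStepR l p := by
        unfold pvStepR
        rw [List.getLast?_append_of_ne_nil rs hl, hx]
        by_cases hc : x.1 = p.2
        · simp only [if_pos hc, List.dropLast_append_of_ne_nil hl, List.append_assoc]
        · simp only [if_neg hc, List.append_assoc]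
      rw [hstep, ih rs (pvStepR l p) (by
        unfold pvStepR
        rw [hx]
        by_cases hc : x.1 = p.2 <;> simp [hc])]

-- B-side: shape of pvBandsOf on a cons of two runs
theorem pv_bandsOf_cons (r : String) (ds : List String) (v : String) (es : List String)
    (tl : List (String × List String)) :
    pvBandsOf ((r, ds) :: (v, es) :: tl)
      = pvBand (ds.headD "") (es.headD "") r :: pvBandsOf ((v, es) :: tl) := by
  simp only [pvBandsOf, pvBand, List.zip, List.zipWith_cons_cons, List.tail_cons,
    List.map_cons, List.getLast?_cons_cons]
  cases h : ((v, es) :: tl).getLast? <;> simp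

-- B-side main invariant
theorem pv_foldR_bandsOf :
    ∀ (t : List (String × String)) (r : String) (ds : List String), ds ≠ [] →
    (∃ ex tl, t.foldl pvStepR [(r, ds)] = (r, ds ++ ex) :: tl) ∧
    pvBandsOf (t.foldl pvStepR [(r, ds)]) = pvF (ds.getLastD "") (ds.headD "") r t := by
  intro t
  induction t with
  | nil =>
      intro r ds hds
      refine ⟨⟨[], [], by simp⟩, ?_⟩
      simp [pvBandsOf, pvF, pvBand]
  | cons p t ih =>
      intro r ds hds
      obtain ⟨d, v⟩ := p
      by_cases hc : r = v
      · have h1 : pvStepR [(r, ds)] (d, v) = [(r, ds ++ [d])] := by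
          simp [pvStepR, hc]
        have hne : ds ++ [d] ≠ [] := by simp
        obtain ⟨⟨ex, tl, hex⟩, hb⟩ := ih r (ds ++ [d]) hne
        constructor
        · exact ⟨[d] ++ ex, tl, by
            simp only [List.foldl_cons, h1]
            simpa [List.append_assoc] using hex⟩
        · simp only [List.foldl_cons, h1, pvF, if_pos (hc.symm)]
          rw [hb, List.getLastD_concat, pv_headD_concat ds d hds]
      · have h1 : pvStepR [(r, ds)] (d, v) = [(r, ds)] ++ [(v, [d])] := by
          simp [pvStepR, hc]
        obtain ⟨⟨ex, tl, hex⟩, hb⟩ := ih v [d] (by simp)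
        have h2 : t.foldl pvStepR ([(r, ds)] ++ [(v, [d])])
            = (r, ds) :: t.foldl pvStepR [(v, [d])] := by
          rw [pv_foldR_append t [(r, ds)] [(v, [d])] (by simp)]; rfl
        constructor
        · exact ⟨[], t.foldl pvStepR [(v, [d])], by
            simp only [List.foldl_cons, h1, h2]; simp⟩
        · simp only [List.foldl_cons, h1, h2]
          rw [hex, pv_bandsOf_cons, ← hex, hb]
          simp [pvF, Ne.symm hc]

-- ===== VERDICT (by name: the statement is the Claim_ definition above) =====
theorem series_to_bands_py_spec : Claim_equal_series_to_bands_py := by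
  intro series _
  show series_to_bands_py series = series_to_bands_py_alt series
  have hnd : (PySem.Dict.ofList series).keys.Nodup := PySem.Dict.nodup_keys_ofList series
  have hperm : (PySem.List.sorted (PySem.Dict.ofList series).items (fun kv => kv.1) false).Perm
      (PySem.Dict.ofList series).items := PySem.List.sorted_perm _ _ _
  have hkeys : (PySem.Dict.ofList series).keys = (PySem.Dict.ofList series).items.map Prod.fst := rfl
  have hmapnd : ((PySem.List.sorted (PySem.Dict.ofList series).items (fun kv => kv.1) false).map
      Prod.fst).Nodup := ((hperm.map Prod.fst).nodup_iff).mpr (hkeys ▸ hnd)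
  have hpw : ((PySem.List.sorted (PySem.Dict.ofList series).items (fun kv => kv.1) false).map
      Prod.fst).Pairwise (· < ·) := by
    have h1 := PySem.List.sorted_pairwise (PySem.Dict.ofList series).items (fun kv => kv.1)
    rw [List.pairwise_map]
    exact (h1.and (List.pairwise_map.mp hmapnd)).imp (fun h => lt_of_le_of_ne h.1 h.2)
  have hsortkeys : PySem.List.sorted (PySem.Dict.ofList series).keys (fun k => k) false
      = (PySem.List.sorted (PySem.Dict.ofList series).items (fun kv => kv.1) false).map Prod.fst :=
    PySem.List.sorted_eq_of_perm_of_pairwise_lt _ _ _ (hkeys ▸ (hperm.map Prod.fst)) hpw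
  have hget : ∀ p ∈ PySem.List.sorted (PySem.Dict.ofList series).items (fun kv => kv.1) false,
      (PySem.Dict.ofList series).getD p.1 "" = p.2 := by
    intro p hp
    obtain ⟨k, v⟩ := p
    exact PySem.Dict.getD_of_mem_items _ ((PySem.List.mem_sorted _ _ _ _).mp hp) hnd ""
  cases hS : PySem.List.sorted (PySem.Dict.ofList series).items (fun kv => kv.1) false with
  | nil =>
      rw [hS] at hsortkeys
      simp only [series_to_bands_py, series_to_bands_py_alt, hsortkeys, hS, List.map_nil]
      rfl
  | cons p0 t =>
      obtain ⟨d0, v0⟩ := p0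
      rw [hS] at hsortkeys hget
      simp only [series_to_bands_py, series_to_bands_py_alt, hsortkeys, hS, List.map_cons]
      have hget0 : (PySem.Dict.ofList series).getD d0 "" = v0 := hget (d0, v0) (by simp)
      -- A side
      have hA : ((t.map Prod.fst).foldl (pvStepA (PySem.Dict.ofList series))
            ([], (PySem.Dict.ofList series).getD d0 "", d0)).1 ++
          [pvBand ((t.map Prod.fst).foldl (pvStepA (PySem.Dict.ofList series))
              ([], (PySem.Dict.ofList series).getD d0 "", d0)).2.2
            ((d0 :: t.map Prod.fst).getLast (by simp))
            ((t.map Prod.fst).foldl (pvStepA (PySem.Dict.ofList series))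
              ([], (PySem.Dict.ofList series).getD d0 "", d0)).2.1]
          = pvF d0 d0 v0 t := by
        rw [hget0, pv_foldA_eq_foldP _ t _ (fun q hq => hget q (by simp [hq])),
          List.getLast_eq_getLastD, pv_getLastD_map t d0]
        exact pv_foldP_eq_pvF t [] v0 d0 d0
      -- B side
      have hB : pvBandsOf (t.foldl pvStepR [(v0, [d0])]) = pvF d0 d0 v0 t :=
        (pv_foldR_bandsOf t v0 [d0] (by simp)).2
      calc _ = pvF d0 d0 v0 t := hA
        _ = _ := hB.symm
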